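-- pv_equiv track=rewrite | github.com/Chunhao-Li/Learning-Python | Course Learning/project/Archive/assignment.py | simulate_bushfire
-- ===== SOURCE A (Python) =====
-- def simulate_bushfire(initial_bushfire, vegetation_type, vegetation_density, steps):
--     """A simple simulation of the spread of a bushfire for a number of steps.
--     This function returns a list of lists.
--
--     initial_bushfire, vegetation_type, vegetation_density: lists of lists.
--     steps: a positive integer.
--     """
--     new_bushfire = [row[:] for row in initial_bushfire]
--     while steps > 0:
--         fire_source = []  # a list contains the indices of fire cells
--         for y in range(len(new_bushfire)):
--             for x in range(len(new_bushfire[y])):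
--                 if new_bushfire[y][x] == '1':
--                     fire_source.append([y, x])
--
--         for index in fire_source:
--             y, x = index[0], index[1]
--             row_upper = min([len(new_bushfire), y + 2])  # upper bound of the row index range
--             row_lower = max([0, y - 1])
--             col_upper = min([len(new_bushfire[y]), x + 2])  # upper bound of the column index range
--             col_lower = max([0, x - 1])
--
--             for i in range(row_lower, row_upper):
--                 for j in range(col_lower, col_upper):
--                     if new_bushfire[i][j] == '0':
--                         new_bushfire[i][j] = '1'
--         steps -= 1
--     return new_bushfire
-- ===== SOURCE B (Python) =====
-- def simulate_bushfire(initial_bushfire, vegetation_type, vegetation_density, steps):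
--     """Spread the fire step by step, but recompute each cell from its own
--     8-neighbourhood (gather) instead of scattering from every fire cell,
--     and stop early once the grid reaches a fixed point."""
--     grid = [row[:] for row in initial_bushfire]
--     s = steps
--     while s > 0:
--         new = [
--             ['1' if cell == '0' and any(
--                 0 <= y + dy < len(grid)
--                 and 0 <= x + dx < len(grid[y + dy])
--                 and grid[y + dy][x + dx] == '1'
--                 for dy in (-1, 0, 1) for dx in (-1, 0, 1))
--              else cell
--              for x, cell in enumerate(row)]
--             for y, row in enumerate(grid)]
--         if new == grid:
--             break
--         grid = new
--         s -= 1
--     return grid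
-- ===== Notes on version B (the rewrite author's own statement) =====
-- stated objective: alternative
-- what changed: B replaces A's scatter pass (collect all fire cells, then mutate each one's 3x3 neighbourhood in place) by a pure gather pass that rebuilds the grid recomputing every cell from its own 8-neighbourhood, and stops early once the grid reaches a fixed point instead of looping all `steps` times (the measured speedup comes from that early exit when steps exceeds the spread distance).
-- outside the precondition, e.g. on simulate_bushfire([['1'], ['0', '0']], [], [], 1): A returns [['1'], ['1', '0']], B returns [['1'], ['1', '1']]; on simulate_bushfire([['1', '0'], ['0']], [], [], 1): A raises IndexError, B returns [['1', '1'], ['1']]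
import Mathlib
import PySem

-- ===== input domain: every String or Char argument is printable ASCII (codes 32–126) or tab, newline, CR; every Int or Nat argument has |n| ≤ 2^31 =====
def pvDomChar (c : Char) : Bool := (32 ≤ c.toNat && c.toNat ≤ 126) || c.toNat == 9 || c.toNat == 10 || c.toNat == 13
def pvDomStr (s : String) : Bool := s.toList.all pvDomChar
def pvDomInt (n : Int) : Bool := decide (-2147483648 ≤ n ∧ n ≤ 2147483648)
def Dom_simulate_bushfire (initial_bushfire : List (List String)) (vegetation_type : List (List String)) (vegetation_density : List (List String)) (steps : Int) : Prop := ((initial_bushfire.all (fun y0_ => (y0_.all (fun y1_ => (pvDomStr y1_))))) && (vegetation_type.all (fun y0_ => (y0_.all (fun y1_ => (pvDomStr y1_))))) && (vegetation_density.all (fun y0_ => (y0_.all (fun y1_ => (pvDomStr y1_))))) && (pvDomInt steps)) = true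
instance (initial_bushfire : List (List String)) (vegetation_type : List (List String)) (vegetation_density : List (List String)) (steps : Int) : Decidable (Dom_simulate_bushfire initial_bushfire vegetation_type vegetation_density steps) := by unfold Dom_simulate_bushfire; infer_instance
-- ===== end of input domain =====

-- B recomputes each cell from its 8-neighbourhood (gather) instead of scattering from every
-- fire cell, and exits early at a fixed point; equivalence is claimed on Pre_ (see below).


-- ===== PORT A =====

-- if new_bushfire[i][j] == '0': new_bushfire[i][j] = '1'
def pvCondSet (h : List (List String)) (i j : Nat) : List (List String) :=
  if (h.getD i []).getD j "" = "0" then h.set i ((h.getD i []).set j "1") else h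

-- the body of 'for index in fire_source'
def pvApplySource (h : List (List String)) (s : Nat × Nat) : List (List String) :=
  let y := s.1
  let x := s.2
  let rl := y - 1                                 -- max(0, y - 1) (Nat subtraction)
  let ru := min h.length (y + 2)
  let cl := x - 1                                 -- max(0, x - 1)
  let cu := min (h.getD y []).length (x + 2)
  (List.range' rl (ru - rl)).foldl (fun h2 i =>
    (List.range' cl (cu - cl)).foldl (fun h3 j => pvCondSet h3 i j) h2) h

-- the 'fire_source' collection pass
def pvFireSources (g : List (List String)) : List (Nat × Nat) :=
  (List.range g.length).foldl (fun acc y =>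
    (List.range (g.getD y []).length).foldl (fun acc2 x =>
      if (g.getD y []).getD x "" = "1" then acc2 ++ [(y, x)] else acc2) acc) []

-- one iteration of A's 'while steps > 0' body
def pvStepA (g : List (List String)) : List (List String) :=
  (pvFireSources g).foldl pvApplySource g

def pvLoopA (g : List (List String)) (steps : Int) : List (List String) :=
  if h : steps > 0 then pvLoopA (pvStepA g) (steps - 1) else g
termination_by steps.toNat
decreasing_by omega

def simulate_bushfire (initial_bushfire : List (List String)) (vegetation_type : List (List String)) (vegetation_density : List (List String)) (steps : Int) : List (List String) :=
  pvLoopA (initial_bushfire.map (fun row => row)) steps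

-- ===== PORT B =====

-- any(... for dy in (-1,0,1) for dx in (-1,0,1))
def pvHasFireNbr (g : List (List String)) (y x : Nat) : Bool :=
  ([-1, 0, 1] : List Int).any fun dy =>
    ([-1, 0, 1] : List Int).any fun dx =>
      decide (0 ≤ (y : Int) + dy) && decide ((y : Int) + dy < (g.length : Int)) &&
      decide (0 ≤ (x : Int) + dx) &&
      decide ((x : Int) + dx < ((g.getD ((y : Int) + dy).toNat []).length : Int)) &&
      ((g.getD ((y : Int) + dy).toNat []).getD ((x : Int) + dx).toNat "" == "1")

-- the per-step grid comprehension of B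
def pvStepB (g : List (List String)) : List (List String) :=
  g.mapIdx fun y row => row.mapIdx fun x c =>
    if c == "0" && pvHasFireNbr g y x then "1" else c

def pvLoopB (g : List (List String)) (s : Int) : List (List String) :=
  if h : s > 0 then
    let n := pvStepB g
    if n = g then g else pvLoopB n (s - 1)
  else g
termination_by s.toNat
decreasing_by omega

def simulate_bushfire_alt (initial_bushfire : List (List String)) (vegetation_type : List (List String)) (vegetation_density : List (List String)) (steps : Int) : List (List String) :=
  pvLoopB (initial_bushfire.map (fun row => row)) steps

-- ===== PRECONDITION & SPEC =====
-- Pre_ excludes ragged (non-rectangular) grids together with fire and positive steps: there A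
-- either raises IndexError or bounds a fire cell's spread by its own row's length instead of the
-- neighbouring row's, an artefact of A's indexing no caller of a grid simulation would specify.
def Pre_simulate_bushfire (initial_bushfire : List (List String)) (vegetation_type : List (List String)) (vegetation_density : List (List String)) (steps : Int) : Prop :=
  steps ≤ 0 ∨
  (∀ row ∈ initial_bushfire, ∀ c ∈ row, c ≠ "1") ∨
  (∀ row ∈ initial_bushfire, row.length = (initial_bushfire.getD 0 []).length)
instance (initial_bushfire : List (List String)) (vegetation_type : List (List String)) (vegetation_density : List (List String)) (steps : Int) : Decidable (Pre_simulate_bushfire initial_bushfire vegetation_type vegetation_density steps) := by unfold Pre_simulate_bushfire; infer_instance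

def pvWitness_simulate_bushfire : List (List String) × List (List String) × List (List String) × Int :=
  ([["1", "0"], ["0", "0"]], [], [], 2)

def Spec_simulate_bushfire (initial_bushfire : List (List String)) (vegetation_type : List (List String)) (vegetation_density : List (List String)) (steps : Int) (out : List (List String)) : Prop := out = simulate_bushfire_alt initial_bushfire vegetation_type vegetation_density steps
instance (initial_bushfire : List (List String)) (vegetation_type : List (List String)) (vegetation_density : List (List String)) (steps : Int) (out : List (List String)) : Decidable (Spec_simulate_bushfire initial_bushfire vegetation_type vegetation_density steps out) := by unfold Spec_simulate_bushfire; infer_instance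

-- ===== CLAIM (what is proved, stated in full; the proofs are below) =====
def Claim_equal_simulate_bushfire : Prop := ∀ (initial_bushfire : List (List String)) (vegetation_type : List (List String)) (vegetation_density : List (List String)) (steps : Int), Dom_simulate_bushfire initial_bushfire vegetation_type vegetation_density steps → Pre_simulate_bushfire initial_bushfire vegetation_type vegetation_density steps → Spec_simulate_bushfire initial_bushfire vegetation_type vegetation_density steps (simulate_bushfire initial_bushfire vegetation_type vegetation_density steps)

-- ===== LEMMAS AND PROOFS =====

-- cell access used throughout: out-of-range reads give ""
def pvCell (g : List (List String)) (i j : Nat) : String := (g.getD i []).getD j ""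

-- rectangularity of a grid
def pvRect (g : List (List String)) : Prop :=
  ∀ row ∈ g, row.length = (g.getD 0 []).length

-- ---- generic getD helpers ----

lemma pv_getD_eq (l : List String) (i : Nat) (h : i < l.length) : l.getD i "" = l[i] := by
  simp [List.getD_eq_getElem?_getD, List.getElem?_eq_getElem h]

lemma pv_getD_row_eq (l : List (List String)) (i : Nat) (h : i < l.length) : l.getD i [] = l[i] := by
  simp [List.getD_eq_getElem?_getD, List.getElem?_eq_getElem h]

lemma pv_grid_ext (g h : List (List String))
    (hl : g.length = h.length)
    (hw : ∀ i, (g.getD i []).length = (h.getD i []).length)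
    (hc : ∀ i j, pvCell g i j = pvCell h i j) : g = h := by
  apply List.ext_getElem hl
  intro i h1 h2
  apply List.ext_getElem
  · have := hw i
    rwa [pv_getD_row_eq _ _ h1, pv_getD_row_eq _ _ h2] at this
  · intro j j1 j2
    have := hc i j
    unfold pvCell at this
    rwa [pv_getD_row_eq _ _ h1, pv_getD_row_eq _ _ h2, pv_getD_eq _ _ j1, pv_getD_eq _ _ j2] at this

-- small getD/set helpers specific to the default values used here
lemma pv_getD_set_self {α : Type} (l : List α) (i : Nat) (r d : α) (h : i < l.length) :
    (l.set i r).getD i d = r := by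
  rw [List.getD_eq_getElem?_getD, List.getElem?_set_self (by simpa using h)]; rfl

lemma pv_getD_set_ne {α : Type} (l : List α) (i a : Nat) (r d : α) (h : a ≠ i) :
    (l.set i r).getD a d = l.getD a d := by
  rw [List.getD_eq_getElem?_getD, List.getElem?_set_ne (Ne.symm h), ← List.getD_eq_getElem?_getD]

lemma pv_getD_oob {α : Type} (l : List α) (i : Nat) (d : α) (h : l.length ≤ i) :
    l.getD i d = d := by
  rw [List.getD_eq_getElem?_getD, List.getElem?_eq_none h]; rfl

-- a cell that reads "0" is a genuine in-range cell (out-of-range reads give "")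
lemma pvCell_zero_bounds {g : List (List String)} {i j : Nat} (h : pvCell g i j = "0") :
    i < g.length ∧ j < (g.getD i []).length := by
  unfold pvCell at h
  constructor
  · by_contra hi
    rw [pv_getD_oob g i [] (by omega)] at h
    simp at h
  · by_contra hj
    rw [pv_getD_oob (g.getD i []) j "" (by omega)] at h
    simp at h

-- ---- characterisation of the single conditional write ----

lemma pvCondSet_length (h : List (List String)) (i j : Nat) :
    (pvCondSet h i j).length = h.length := by
  unfold pvCondSet; split <;> simp

lemma pvCondSet_width (h : List (List String)) (i j a : Nat) :
    ((pvCondSet h i j).getD a []).length = (h.getD a []).length := by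
  unfold pvCondSet
  split
  · rename_i hz
    obtain ⟨hi, hj⟩ := pvCell_zero_bounds (g := h) hz
    by_cases hai : a = i
    · subst hai
      rw [pv_getD_set_self _ _ _ _ hi, List.length_set]
    · rw [pv_getD_set_ne _ _ _ _ _ hai]
  · rfl

lemma pvCell_condSet (h : List (List String)) (i j a b : Nat) :
    pvCell (pvCondSet h i j) a b =
      if a = i ∧ b = j ∧ pvCell h i j = "0" then "1" else pvCell h a b := by
  unfold pvCondSet
  by_cases hz : (h.getD i []).getD j "" = "0"
  · rw [if_pos hz]
    have hz' : pvCell h i j = "0" := hz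
    obtain ⟨hi, hj⟩ := pvCell_zero_bounds hz'
    by_cases hai : a = i
    · subst hai
      rw [pvCell, pv_getD_set_self _ _ _ _ hi]
      by_cases hbj : b = j
      · subst hbj
        rw [if_pos ⟨rfl, rfl, hz'⟩, pv_getD_set_self _ _ _ _ hj]
      · rw [if_neg (by tauto), pv_getD_set_ne _ _ _ _ _ hbj]
        rfl
    · rw [pvCell, pv_getD_set_ne _ _ _ _ _ hai, if_neg (by tauto)]
      rfl
  · rw [if_neg hz, if_neg (by exact fun hx => hz hx.2.2)]

-- ---- the invariant carried through A's scatter pass ----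

def pvMarkedBy (g h : List (List String)) (p : Nat → Nat → Prop) : Prop :=
  h.length = g.length ∧
  (∀ a, (h.getD a []).length = (g.getD a []).length) ∧
  (∀ a b, pvCell g a b = "0" → p a b → pvCell h a b = "1") ∧
  (∀ a b, (pvCell g a b ≠ "0" ∨ ¬ p a b) → pvCell h a b = pvCell g a b)

lemma pvMarkedBy_congr {g h : List (List String)} {p q : Nat → Nat → Prop}
    (hpq : ∀ a b, p a b ↔ q a b) (hm : pvMarkedBy g h p) : pvMarkedBy g h q := by
  obtain ⟨h1, h2, h3, h4⟩ := hm
  exact ⟨h1, h2, fun a b hz hq => h3 a b hz ((hpq a b).2 hq),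
    fun a b hor => h4 a b (hor.imp id (fun hq hp => hq ((hpq a b).1 hp)))⟩

lemma pvMarkedBy_refl (g : List (List String)) : pvMarkedBy g g (fun _ _ => False) :=
  ⟨rfl, fun _ => rfl, fun _ _ _ hf => hf.elim, fun _ _ _ => rfl⟩

lemma pvCondSet_marked {g h : List (List String)} {p : Nat → Nat → Prop} (i j : Nat)
    (hm : pvMarkedBy g h p) :
    pvMarkedBy g (pvCondSet h i j) (fun a b => p a b ∨ (a = i ∧ b = j)) := by
  obtain ⟨h1, h2, h3, h4⟩ := hm
  refine ⟨(pvCondSet_length h i j).trans h1, fun a => (pvCondSet_width h i j a).trans (h2 a), ?_, ?_⟩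
  · intro a b hz hpq
    rw [pvCell_condSet]
    rcases hpq with hp | ⟨hai, hbj⟩
    · split
      · rfl
      · exact h3 a b hz hp
    · subst hai; subst hbj
      by_cases hp : p a b
      · rw [if_neg (by rw [h3 a b hz hp]; simp), h3 a b hz hp]
      · rw [if_pos ⟨rfl, rfl, h4 a b (Or.inr hp) ▸ hz⟩]
  · intro a b hor
    have hnp : pvCell g a b ≠ "0" ∨ ¬ p a b := hor.imp id (fun hq hp => hq (Or.inl hp))
    have hnij : pvCell g a b ≠ "0" ∨ ¬ (a = i ∧ b = j) := hor.imp id (fun hq hp => hq (Or.inr hp))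
    rw [pvCell_condSet]
    rw [if_neg ?_]
    · exact h4 a b hnp
    · rintro ⟨hai, hbj, hz⟩
      subst hai; subst hbj
      rcases hnij with hne | hij
      · exact hne (by rcases hnp with hne' | hp
                      · exact absurd ((h4 a b (Or.inl hne')) ▸ hz) hne'
                      · exact (h4 a b (Or.inr hp)) ▸ hz)
      · exact hij ⟨rfl, rfl⟩

lemma pvFoldJ_marked {g : List (List String)} (M : List Nat) (i : Nat) :
    ∀ (h : List (List String)) (p : Nat → Nat → Prop), pvMarkedBy g h p →
    pvMarkedBy g (M.foldl (fun h3 j => pvCondSet h3 i j) h)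
      (fun a b => p a b ∨ (a = i ∧ b ∈ M)) := by
  induction M with
  | nil => intro h p hm; simpa using pvMarkedBy_congr (by simp) hm
  | cons j M ih =>
    intro h p hm
    have := ih (pvCondSet h i j) _ (pvCondSet_marked i j hm)
    refine pvMarkedBy_congr (fun a b => ?_) this
    simp only [List.mem_cons]
    tauto

lemma pvFoldIJ_marked {g : List (List String)} (L M : List Nat) :
    ∀ (h : List (List String)) (p : Nat → Nat → Prop), pvMarkedBy g h p →
    pvMarkedBy g (L.foldl (fun h2 i => M.foldl (fun h3 j => pvCondSet h3 i j) h2) h)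
      (fun a b => p a b ∨ (a ∈ L ∧ b ∈ M)) := by
  induction L with
  | nil => intro h p hm; simpa using pvMarkedBy_congr (by simp) hm
  | cons i L ih =>
    intro h p hm
    have := ih _ _ (pvFoldJ_marked M i h p hm)
    refine pvMarkedBy_congr (fun a b => ?_) this
    simp only [List.mem_cons]
    tauto

-- the rectangle of cells a source at (y, x) writes to (bounds taken from g's dimensions)
def pvBox (g : List (List String)) (s : Nat × Nat) (a b : Nat) : Prop :=
  s.1 - 1 ≤ a ∧ a < min g.length (s.1 + 2) ∧
  s.2 - 1 ≤ b ∧ b < min (g.getD s.1 []).length (s.2 + 2)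

lemma pvApplySource_marked {g h : List (List String)} {p : Nat → Nat → Prop} (s : Nat × Nat)
    (hm : pvMarkedBy g h p) :
    pvMarkedBy g (pvApplySource h s) (fun a b => p a b ∨ pvBox g s a b) := by
  have h1 := hm.1
  have h2 := hm.2.1
  unfold pvApplySource
  refine pvMarkedBy_congr (fun a b => ?_) (pvFoldIJ_marked _ _ h p hm)
  refine or_congr Iff.rfl ?_
  unfold pvBox
  simp only [List.mem_range'_1, h1, h2 s.1]
  omega

lemma pvFoldSources_marked {g : List (List String)} (fs : List (Nat × Nat)) :
    ∀ (h : List (List String)) (p : Nat → Nat → Prop), pvMarkedBy g h p →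
    pvMarkedBy g (fs.foldl pvApplySource h)
      (fun a b => p a b ∨ ∃ s ∈ fs, pvBox g s a b) := by
  induction fs with
  | nil => intro h p hm; simpa using pvMarkedBy_congr (by simp) hm
  | cons s fs ih =>
    intro h p hm
    have := ih _ _ (pvApplySource_marked s hm)
    refine pvMarkedBy_congr (fun a b => ?_) this
    simp only [List.mem_cons]
    constructor
    · rintro ((hp | hb) | ⟨t, ht, hb⟩)
      · exact Or.inl hp
      · exact Or.inr ⟨s, Or.inl rfl, hb⟩
      · exact Or.inr ⟨t, Or.inr ht, hb⟩
    · rintro (hp | ⟨t, (rfl | ht), hb⟩)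
      · exact Or.inl (Or.inl hp)
      · exact Or.inl (Or.inr hb)
      · exact Or.inr ⟨t, ht, hb⟩

lemma pvStepA_marked (g : List (List String)) :
    pvMarkedBy g (pvStepA g) (fun a b => ∃ s ∈ pvFireSources g, pvBox g s a b) := by
  have := pvFoldSources_marked (g := g) (pvFireSources g) g _ (pvMarkedBy_refl g)
  exact pvMarkedBy_congr (by simp) this

-- ---- which cells are fire sources ----

lemma pvFireSources_eq (g : List (List String)) :
    pvFireSources g = (List.range g.length).flatMap (fun y =>
      ((List.range (g.getD y []).length).filter (fun x => (g.getD y []).getD x "" == "1")).map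
        (fun x => (y, x))) := by
  unfold pvFireSources
  have hinner : ∀ (y : Nat) (acc : List (Nat × Nat)),
      (List.range (g.getD y []).length).foldl (fun acc2 x =>
        if (g.getD y []).getD x "" = "1" then acc2 ++ [(y, x)] else acc2) acc =
      acc ++ ((List.range (g.getD y []).length).filter
        (fun x => (g.getD y []).getD x "" == "1")).map (fun x => (y, x)) := by
    intro y acc
    rw [← PySem.List.foldl_append_if (fun x => (g.getD y []).getD x "" == "1") (fun x => (y, x))]
    congr 1
    funext acc2 x
    simp
  calc (List.range g.length).foldl (fun acc y =>
        (List.range (g.getD y []).length).foldl (fun acc2 x =>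
          if (g.getD y []).getD x "" = "1" then acc2 ++ [(y, x)] else acc2) acc) []
      = (List.range g.length).foldl (fun acc y => acc ++ ((List.range (g.getD y []).length).filter
          (fun x => (g.getD y []).getD x "" == "1")).map (fun x => (y, x))) [] := by
        congr 1; funext acc y; exact hinner y acc
    _ = _ := by rw [PySem.List.foldl_append_eq_flatMap]; rfl

lemma pv_mem_fireSources (g : List (List String)) (y x : Nat) :
    (y, x) ∈ pvFireSources g ↔
      y < g.length ∧ x < (g.getD y []).length ∧ pvCell g y x = "1" := by
  rw [pvFireSources_eq]
  simp only [List.mem_flatMap, List.mem_map, List.mem_filter, List.mem_range]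
  constructor
  · rintro ⟨y', hy', x', ⟨⟨hx', hfire⟩, heq⟩⟩
    obtain ⟨rfl, rfl⟩ := Prod.mk.injEq .. ▸ heq
    exact ⟨hy', hx', by simpa [pvCell] using hfire⟩
  · rintro ⟨hy, hx, hfire⟩
    exact ⟨y, hy, x, ⟨⟨hx, by simpa [pvCell] using hfire⟩, rfl⟩⟩

-- ---- characterisation of B's step ----

lemma pvStepB_length (g : List (List String)) : (pvStepB g).length = g.length := by
  simp [pvStepB]

lemma pvStepB_width (g : List (List String)) (a : Nat) :
    ((pvStepB g).getD a []).length = (g.getD a []).length := by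
  by_cases ha : a < g.length
  · rw [pv_getD_row_eq _ _ (by simpa [pvStepB_length] using ha), pv_getD_row_eq _ _ ha]
    simp [pvStepB]
  · rw [List.getD_eq_getElem?_getD, List.getElem?_eq_none (by simp [pvStepB_length]; omega),
        List.getD_eq_getElem?_getD (l := g), List.getElem?_eq_none (by omega)]

lemma pvCell_stepB (g : List (List String)) (a b : Nat) :
    pvCell (pvStepB g) a b =
      if pvCell g a b = "0" ∧ pvHasFireNbr g a b = true then "1" else pvCell g a b := by
  by_cases ha : a < g.length
  · by_cases hb : b < (g.getD a []).length
    · have hb' : b < ((g.getD a []) : List String).length := hb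
      rw [pvCell, pv_getD_row_eq _ _ (by simpa [pvStepB_length] using ha)]
      rw [pvCell, pv_getD_row_eq _ _ ha] at *
      simp only [pvStepB, List.getElem_mapIdx]
      rw [pv_getD_eq _ _ (by simpa using hb), pv_getD_eq _ _ hb]
      simp only [List.getElem_mapIdx]
      rcases Bool.eq_false_or_eq_true (pvHasFireNbr g a b) with hn | hn <;>
        by_cases hz : g[a][b] = "0" <;>
        simp [hn, hz]
    · have hcz : pvCell g a b = "" := by
        rw [pvCell, pv_getD_oob (g.getD a []) b "" (by omega)]
      have hcz' : pvCell (pvStepB g) a b = "" := by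
        rw [pvCell, pv_getD_oob ((pvStepB g).getD a []) b "" (by rw [pvStepB_width]; omega)]
      rw [hcz, hcz', if_neg (by simp)]
  · have hcz : pvCell g a b = "" := by
      rw [pvCell, pv_getD_oob g a [] (by omega)]
      rfl
    have hcz' : pvCell (pvStepB g) a b = "" := by
      rw [pvCell, pv_getD_oob (pvStepB g) a [] (by rw [pvStepB_length]; omega)]
      rfl
    rw [hcz, hcz', if_neg (by simp)]

lemma pvHasFireNbr_iff (g : List (List String)) (a b : Nat) :
    pvHasFireNbr g a b = true ↔
      ∃ y x : Nat, y < g.length ∧ x < (g.getD y []).length ∧ pvCell g y x = "1" ∧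
        y ≤ a + 1 ∧ a ≤ y + 1 ∧ x ≤ b + 1 ∧ b ≤ x + 1 := by
  unfold pvHasFireNbr
  constructor
  · intro h
    simp only [List.any_eq_true] at h
    obtain ⟨dy, hdy, dx, hdx, hb⟩ := h
    simp only [List.mem_cons, List.not_mem_nil, or_false] at hdy hdx
    simp only [Bool.and_eq_true, decide_eq_true_eq, beq_iff_eq] at hb
    obtain ⟨⟨⟨⟨h1, h2⟩, h3⟩, h4⟩, h5⟩ := hb
    exact ⟨((a : Int) + dy).toNat, ((b : Int) + dx).toNat, by omega, by omega, h5,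
      by omega, by omega, by omega, by omega⟩
  · rintro ⟨y, x, hy, hx, hf, c1, c2, c3, c4⟩
    simp only [List.any_eq_true]
    refine ⟨(y : Int) - a, by simp only [List.mem_cons, List.not_mem_nil, or_false]; omega,
      (x : Int) - b, by simp only [List.mem_cons, List.not_mem_nil, or_false]; omega, ?_⟩
    have e1 : ((a : Int) + ((y : Int) - a)).toNat = y := by omega
    rw [e1]
    have e2 : ((b : Int) + ((x : Int) - b)).toNat = x := by omega
    rw [e2]
    simp only [Bool.and_eq_true, decide_eq_true_eq, beq_iff_eq]
    exact ⟨⟨⟨⟨by omega, by omega⟩, by omega⟩, by omega⟩, hf⟩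

-- ---- rectangularity ----

lemma pvRect_iff (g : List (List String)) :
    pvRect g ↔ ∀ a, a < g.length → (g.getD a []).length = (g.getD 0 []).length := by
  unfold pvRect
  constructor
  · intro h a ha
    rw [pv_getD_row_eq _ _ ha]
    exact h _ (List.getElem_mem ha)
  · intro h row hrow
    obtain ⟨a, ha, rfl⟩ := List.mem_iff_getElem.1 hrow
    rw [← pv_getD_row_eq _ _ ha]
    exact h a ha

lemma pvStepB_rect {g : List (List String)} (hr : pvRect g) : pvRect (pvStepB g) := by
  rw [pvRect_iff] at hr ⊢
  intro a ha
  rw [pvStepB_width, pvStepB_width]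
  exact hr a (by simpa [pvStepB_length] using ha)

-- ---- the two step functions agree on rectangular grids ----

lemma pvStep_eq {g : List (List String)} (hr : pvRect g) : pvStepA g = pvStepB g := by
  obtain ⟨h1, h2, h3, h4⟩ := pvStepA_marked g
  apply pv_grid_ext
  · rw [h1, pvStepB_length]
  · intro i; rw [h2 i, pvStepB_width]
  · intro a b
    rw [pvCell_stepB]
    by_cases hz : pvCell g a b = "0"
    · obtain ⟨haR, hbW⟩ := pvCell_zero_bounds hz
      have hiff : (∃ s ∈ pvFireSources g, pvBox g s a b) ↔ pvHasFireNbr g a b = true := by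
        constructor
        · rintro ⟨⟨y, x⟩, hmem, hbox⟩
          obtain ⟨hy, hx, hfire⟩ := (pv_mem_fireSources g y x).1 hmem
          obtain ⟨hb1, hb2, hb3, hb4⟩ := hbox
          rw [pvHasFireNbr_iff]
          exact ⟨y, x, hy, hx, hfire, by omega, by omega, by omega, by omega⟩
        · intro hn
          obtain ⟨y, x, hy, hx, hfire, hya, hay, hxb, hbx⟩ := (pvHasFireNbr_iff g a b).1 hn
          refine ⟨(y, x), (pv_mem_fireSources g y x).2 ⟨hy, hx, hfire⟩, by omega, by omega, by omega, ?_⟩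
          have hW : (g.getD y []).length = (g.getD a []).length := by
            rw [(pvRect_iff g).1 hr y hy, (pvRect_iff g).1 hr a haR]
          simp only [hW]
          omega
      by_cases hp : ∃ s ∈ pvFireSources g, pvBox g s a b
      · rw [h3 a b hz hp, if_pos ⟨hz, hiff.1 hp⟩]
      · rw [h4 a b (Or.inr hp), if_neg (by rintro ⟨-, hn⟩; exact hp (hiff.2 hn))]
    · rw [h4 a b (Or.inl hz), if_neg (by tauto)]

-- ---- the no-fire cases: both steps are the identity ----

lemma pvStepA_id_nofire {g : List (List String)}
    (hnf : ∀ row ∈ g, ∀ c ∈ row, c ≠ "1") : pvStepA g = g := by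
  have hfs : pvFireSources g = [] := by
    rw [List.eq_nil_iff_forall_not_mem]
    rintro ⟨y, x⟩ hmem
    obtain ⟨hy, hx, hfire⟩ := (pv_mem_fireSources g y x).1 hmem
    refine hnf (g.getD y []) ?_ ((g.getD y []).getD x "") ?_ hfire
    · rw [pv_getD_row_eq _ _ hy]; exact List.getElem_mem hy
    · rw [pv_getD_eq _ _ hx]; exact List.getElem_mem hx
  unfold pvStepA
  rw [hfs]
  rfl

lemma pvStepB_id_nofire {g : List (List String)}
    (hnf : ∀ row ∈ g, ∀ c ∈ row, c ≠ "1") : pvStepB g = g := by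
  apply pv_grid_ext
  · exact pvStepB_length g
  · exact pvStepB_width g
  · intro a b
    rw [pvCell_stepB]
    rw [if_neg]
    rintro ⟨-, hn⟩
    obtain ⟨y, x, hy, hx, hfire, -⟩ := (pvHasFireNbr_iff g a b).1 hn
    refine hnf (g.getD y []) ?_ ((g.getD y []).getD x "") ?_ hfire
    · rw [pv_getD_row_eq _ _ hy]; exact List.getElem_mem hy
    · rw [pv_getD_eq _ _ hx]; exact List.getElem_mem hx

-- ---- the loops ----

lemma pvLoopA_fix {g : List (List String)} (hfix : pvStepA g = g) :
    ∀ (s : Int), pvLoopA g s = g := by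
  intro s
  induction hn : s.toNat generalizing s with
  | zero => rw [pvLoopA, dif_neg (by omega)]
  | succ n ih =>
    rw [pvLoopA, dif_pos (by omega), hfix]
    exact ih (s - 1) (by omega)

lemma pvLoop_eq : ∀ (n : Nat) (g : List (List String)) (s : Int), s.toNat = n → pvRect g →
    pvLoopA g s = pvLoopB g s := by
  intro n
  induction n with
  | zero =>
    intro g s hs _
    rw [pvLoopA, dif_neg (by omega), pvLoopB, dif_neg (by omega)]
  | succ n ih =>
    intro g s hs hr
    rw [pvLoopA, dif_pos (by omega), pvLoopB, dif_pos (by omega), pvStep_eq hr]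
    by_cases hfix : pvStepB g = g
    · rw [if_pos hfix, hfix, pvLoopA_fix (by rw [pvStep_eq hr, hfix])]
    · rw [if_neg hfix]
      exact ih (pvStepB g) (s - 1) (by omega) (pvStepB_rect hr)

-- ===== VERDICT (by name: the statement is the Claim_ definition above) =====
theorem simulate_bushfire_spec : Claim_equal_simulate_bushfire := by
  intro ib vt vd steps _ hpre
  unfold Spec_simulate_bushfire simulate_bushfire simulate_bushfire_alt
  simp only [List.map_id']
  rcases hpre with hs | hnf | hrect
  · rw [pvLoopA, dif_neg (by omega), pvLoopB, dif_neg (by omega)]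
  · rw [pvLoopA_fix (pvStepA_id_nofire hnf), pvLoopB, pvStepB_id_nofire hnf]
    split
    · rw [if_pos rfl]
    · rfl
  · exact pvLoop_eq steps.toNat ib steps rfl hrect
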